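-- pv_equiv track=rewrite | github.com/Nooshinnn/fusions | phase14_build_comprehensive_offline_features.py | count_repeated_char_runs
-- ===== SOURCE A (Python) =====
-- def count_repeated_char_runs(s: str) -> int:
--     cnt = 0
--     run = 1
--     for i in range(1, len(s)):
--         if s[i] == s[i - 1]:
--             run += 1
--             if run == 3:
--                 cnt += 1
--         else:
--             run = 1
--     return cnt
-- ===== SOURCE B (Python) =====
-- def count_repeated_char_runs(s: str) -> int:
--     # Run-length encode the string, then count the runs of length >= 3.
--     runs = []
--     for c in s:
--         if runs and runs[-1][0] == c:
--             runs[-1][1] += 1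
--         else:
--             runs.append([c, 1])
--     return sum(1 for _, n in runs if n >= 3)
-- ===== Notes on version B (the rewrite author's own statement) =====
-- stated objective: idiomatic
-- what changed: Replaces the manual index loop with a run counter and the run==3 sentinel by a run-length encoding pass followed by counting the runs of length >= 3.
import Mathlib
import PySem

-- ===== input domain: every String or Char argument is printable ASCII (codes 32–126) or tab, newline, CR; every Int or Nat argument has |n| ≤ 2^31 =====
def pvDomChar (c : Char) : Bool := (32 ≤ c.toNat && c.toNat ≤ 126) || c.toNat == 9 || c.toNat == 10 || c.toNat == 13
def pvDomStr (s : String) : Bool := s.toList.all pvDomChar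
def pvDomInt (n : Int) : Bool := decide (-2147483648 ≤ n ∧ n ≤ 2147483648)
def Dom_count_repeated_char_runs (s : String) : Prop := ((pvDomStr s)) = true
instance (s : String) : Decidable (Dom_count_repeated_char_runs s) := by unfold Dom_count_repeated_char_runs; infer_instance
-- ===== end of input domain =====

-- B replaces A's manual index loop with a run-counter and a run==3 sentinel by a
-- run-length-encoding pass followed by counting the runs of length ≥ 3 (idiomatic; same cost).

-- ===== PORT A =====
-- literal transliteration of A: fold over range(1, len(s)) carrying (cnt, run);
-- s[i] / s[i-1] are PySem.List.pyGet? (always in range here, so the Option compare is exact)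
def count_repeated_char_runs (s : String) : Int :=
  let cs := s.toList
  ((PySem.List.pyRange 1 (cs.length : Int) 1).foldl
    (fun (st : Int × Int) i =>
      if PySem.List.pyGet? cs i = PySem.List.pyGet? cs (i - 1) then
        let run := st.2 + 1
        (if run = 3 then st.1 + 1 else st.1, run)
      else (st.1, 1)) ((0 : Int), (1 : Int))).1

-- ===== PORT B =====
-- Source B builds the run-length list front-to-back, updating the last run in place;
-- the Lean port keeps the accumulator reversed (current run at the head) and reverses at the end.
def runsStepB (acc : List (Char × Int)) (c : Char) : List (Char × Int) :=
  match acc with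
  | [] => [(c, 1)]
  | (d, n) :: t => if d = c then (d, n + 1) :: t else (c, 1) :: (d, n) :: t

def count_repeated_char_runs_alt (s : String) : Int :=
  (((s.toList.foldl runsStepB []).reverse.filter (fun r => 3 ≤ r.2)).length : Int)

-- ===== PRECONDITION & SPEC =====
def Spec_count_repeated_char_runs (s : String) (out : Int) : Prop := out = count_repeated_char_runs_alt s
instance (s : String) (out : Int) : Decidable (Spec_count_repeated_char_runs s out) := by unfold Spec_count_repeated_char_runs; infer_instance

-- ===== CLAIM (what is proved, stated in full; the proofs are below) =====
def Claim_equal_count_repeated_char_runs : Prop := ∀ (s : String), Dom_count_repeated_char_runs s → Spec_count_repeated_char_runs s (count_repeated_char_runs s)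

-- ===== LEMMAS AND PROOFS =====

-- A's loop rephrased over the suffix of characters, carrying the previous char
def loopA : List Char → Char → Int × Int → Int × Int
  | [], _, st => st
  | c :: rest, p, st =>
    if c = p then
      loopA rest c (if st.2 + 1 = 3 then st.1 + 1 else st.1, st.2 + 1)
    else
      loopA rest c (st.1, 1)

-- count of runs with length ≥ 3 in an accumulator
def countGE3 (l : List (Char × Int)) : Int :=
  ((l.filter (fun r => 3 ≤ r.2)).length : Int)

theorem countGE3_reverse (l : List (Char × Int)) : countGE3 l.reverse = countGE3 l := by
  simp [countGE3, List.filter_reverse]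

-- the index fold of port A equals loopA on the remaining suffix
theorem foldA_eq_loopA (cs : List Char) :
    ∀ (k i : Nat) (st : Int × Int), i + k = cs.length → 1 ≤ i →
    ∀ (hi : i - 1 < cs.length),
    (PySem.List.pyRange (i : Int) (cs.length : Int) 1).foldl
      (fun (st : Int × Int) j =>
        if PySem.List.pyGet? cs j = PySem.List.pyGet? cs (j - 1) then
          (if st.2 + 1 = 3 then st.1 + 1 else st.1, st.2 + 1)
        else (st.1, 1)) st
      = loopA (cs.drop i) cs[i - 1] st := by
  intro k
  induction k with
  | zero =>
    intro i st hik hi1 hlt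
    have hie : i = cs.length := by omega
    subst hie
    rw [PySem.List.pyRange_one_eq_nil (by omega)]
    simp [loopA, List.drop_eq_nil_of_le (le_refl _)]
  | succ k ih =>
    intro i st hik hi1 hlt
    have hilt : i < cs.length := by omega
    rw [PySem.List.pyRange_one_cons (by exact_mod_cast hilt)]
    rw [List.foldl_cons]
    have hget : PySem.List.pyGet? cs (i : Int) = some cs[i] :=
      PySem.List.pyGet?_ofNat cs i hilt
    have hcast : ((i : Int) - 1) = ((i - 1 : Nat) : Int) := by omega
    have hget' : PySem.List.pyGet? cs ((i : Int) - 1) = some cs[i - 1] := by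
      rw [hcast]; exact PySem.List.pyGet?_ofNat cs (i - 1) hlt
    have hdrop : cs.drop i = cs[i] :: cs.drop (i + 1) :=
      List.drop_eq_getElem_cons hilt
    have hi1' : ((i : Int) + 1) = ((i + 1 : Nat) : Int) := by omega
    have hrec := ih (i + 1) (if PySem.List.pyGet? cs (i : Int) = PySem.List.pyGet? cs ((i : Int) - 1) then
        (if st.2 + 1 = 3 then st.1 + 1 else st.1, st.2 + 1) else (st.1, 1))
      (by omega) (by omega) (by omega)
    rw [hi1']
    rw [hrec]
    have hidx : i + 1 - 1 = i := by omega
    rw [hdrop, hget, hget', loopA]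
    simp only [Option.some.injEq, hidx]
    by_cases h : cs[i] = cs[i - 1] <;> simp [h]

-- loop invariant: loopA's counter tracks countGE3 of the run accumulator
theorem loopA_inv (rest : List Char) :
    ∀ (p : Char) (n : Int) (t : List (Char × Int)),
    (loopA rest p (countGE3 ((p, n) :: t), n)).1
      = countGE3 (rest.foldl runsStepB ((p, n) :: t)) := by
  induction rest with
  | nil => intro p n t; simp [loopA]
  | cons c rest ih =>
    intro p n t
    by_cases hc : c = p
    · subst hc
      have hcnt : (if n + 1 = 3 then countGE3 ((c, n) :: t) + 1 else countGE3 ((c, n) :: t))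
          = countGE3 ((c, n + 1) :: t) := by
        simp only [countGE3, List.filter_cons]
        split_ifs with h1 h2 h3 h2 h3 <;> simp_all <;> omega
      simp only [loopA, runsStepB, List.foldl_cons]
      rw [hcnt]
      exact ih c (n + 1) t
    · have hcnt : countGE3 ((c, 1) :: (p, n) :: t) = countGE3 ((p, n) :: t) := by
        simp [countGE3, List.filter_cons]
      simp only [loopA, runsStepB, List.foldl_cons, if_neg hc,
        if_neg (fun h : p = c => hc h.symm)]
      rw [← hcnt]
      exact ih c 1 ((p, n) :: t)

theorem ports_agree (s : String) :
    count_repeated_char_runs s = count_repeated_char_runs_alt s := by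
  show _ = countGE3 ((s.toList.foldl runsStepB []).reverse)
  rw [countGE3_reverse]
  unfold count_repeated_char_runs
  cases hcs : s.toList with
  | nil =>
    simp [PySem.List.pyRange_one_eq_nil, countGE3]
  | cons c rest =>
    have hmain := foldA_eq_loopA (c :: rest) rest.length 1 ((0 : Int), (1 : Int))
      (by simp [Nat.add_comm]) (le_refl 1) (by simp)
    show ((PySem.List.pyRange ((1 : Nat) : Int) ((c :: rest).length : Int) 1).foldl
      (fun (st : Int × Int) j =>
        if PySem.List.pyGet? (c :: rest) j = PySem.List.pyGet? (c :: rest) (j - 1) then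
          (if st.2 + 1 = 3 then st.1 + 1 else st.1, st.2 + 1)
        else (st.1, 1)) ((0 : Int), (1 : Int))).1 = _
    rw [hmain]
    have h0 : (0 : Int) = countGE3 [(c, 1)] := by simp [countGE3]
    calc (loopA ((c :: rest).drop 1) (c :: rest)[1 - 1] ((0 : Int), (1 : Int))).1
        = (loopA rest c (countGE3 [(c, 1)], 1)).1 := by rw [← h0]; rfl
      _ = countGE3 (rest.foldl runsStepB [(c, 1)]) := loopA_inv rest c 1 []
      _ = countGE3 ((c :: rest).foldl runsStepB []) := rfl

-- ===== VERDICT (by name: the statement is the Claim_ definition above) =====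
theorem count_repeated_char_runs_spec : Claim_equal_count_repeated_char_runs := by
  intro s _
  unfold Spec_count_repeated_char_runs
  exact ports_agree s
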